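-- pv_equiv track=rewrite | github.com/vanyu51/disasm | disasm.py | symbols
-- ===== SOURCE A (Python) =====
-- def symbols(m):
--     a = '-'
--     b = '-'
--     al = 'PbqsdKrk'
--     for i in m:
--         if i in al:
--             a = i
--     for i in m:
--         if i in al and a != i:
--             b = i
--     s = ''
--     for i in al:
--         if a == i:
--             s += a
--         if b == i:
--             s += b
--     return(s)
-- ===== SOURCE B (Python) =====
-- def symbols(m):
--     al = 'PbqsdKrk'
--     x = y = '-'
--     for c in m:
--         if c in al and c != x:
--             x, y = c, x
--     return ''.join(c for c in al if c == x or c == y)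
-- ===== Notes on version B (the rewrite author's own statement) =====
-- stated objective: simpler
-- what changed: A's two full scans (last special char, then last special char differing from the first) are replaced by a single scan maintaining the top-two pair (x, y), and the ordered output loop with conditional appends is replaced by a filter of the alphabet.
import Mathlib
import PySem

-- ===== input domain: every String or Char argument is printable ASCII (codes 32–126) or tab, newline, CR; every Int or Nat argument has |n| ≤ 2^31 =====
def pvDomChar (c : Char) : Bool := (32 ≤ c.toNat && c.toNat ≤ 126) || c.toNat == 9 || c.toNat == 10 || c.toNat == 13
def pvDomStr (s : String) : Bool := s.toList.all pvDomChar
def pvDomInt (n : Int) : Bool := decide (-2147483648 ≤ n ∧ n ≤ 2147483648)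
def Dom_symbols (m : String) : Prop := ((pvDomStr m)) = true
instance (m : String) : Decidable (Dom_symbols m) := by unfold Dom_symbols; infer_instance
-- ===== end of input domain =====

-- B replaces A's two full scans (last special, then last special ≠ a) by ONE scan keeping the
-- top-two pair, and builds the result as a filter of the alphabet; objective: simpler.

-- ===== PORT A =====
def symbols (m : String) : String :=
  let al : List Char := "PbqsdKrk".toList
  let a : Char := m.toList.foldl (fun a i => if al.contains i then i else a) '-'
  let b : Char := m.toList.foldl (fun b i => if al.contains i && a != i then i else b) '-'
  let s : List Char := al.foldl (fun s i =>
      let s := if a == i then s ++ [a] else s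
      if b == i then s ++ [b] else s) []
  String.mk s

-- ===== PORT B =====
def symbols_alt (m : String) : String :=
  let al : List Char := "PbqsdKrk".toList
  let p : Char × Char := m.toList.foldl (fun p c =>
      if al.contains c && c != p.1 then (c, p.1) else p) ('-', '-')
  String.mk (al.filter (fun c => c == p.1 || c == p.2))

-- ===== PRECONDITION & SPEC =====
def Spec_symbols (m : String) (out : String) : Prop := out = symbols_alt m
instance (m : String) (out : String) : Decidable (Spec_symbols m out) := by unfold Spec_symbols; infer_instance

-- ===== CLAIM (what is proved, stated in full; the proofs are below) =====
def Claim_equal_symbols : Prop := ∀ (m : String), Dom_symbols m → Spec_symbols m (symbols m)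

-- ===== LEMMAS AND PROOFS =====

-- a "keep the last element satisfying p" fold equals find? on the reversed list
theorem lastFind (p : Char → Bool) (l : List Char) : ∀ x : Char,
    l.foldl (fun a i => if p i then i else a) x = (l.reverse.find? p).getD x := by
  induction l with
  | nil => intro x; simp
  | cons c l ih =>
    intro x
    simp only [List.foldl_cons, List.reverse_cons, List.find?_append, ih]
    cases h : l.reverse.find? p with
    | some s => simp
    | none =>
      cases hp : p c <;> simp [hp]

-- characterisation of B's single-pass top-two fold via find? on the reversed list
theorem pairFind (sp : Char → Bool) (l : List Char) : ∀ x y : Char,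
    l.foldl (fun p c => if sp c && c != p.1 then (c, p.1) else p) (x, y)
    = match l.reverse.find? sp with
      | none => (x, y)
      | some s => (s, (l.reverse.find? (fun c => sp c && s != c)).getD (if s == x then y else x)) := by
  induction l with
  | nil => intro x y; simp
  | cons c l ih =>
    intro x y
    simp only [List.foldl_cons, List.reverse_cons, List.find?_append]
    cases h : l.reverse.find? sp with
    | none =>
      have hnone : ∀ s : Char, l.reverse.find? (fun c => sp c && s != c) = none := by
        intro s
        rw [List.find?_eq_none]
        intro u hu
        have := (List.find?_eq_none.mp h) u hu
        simp_all
      cases hp : sp c with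
      | false =>
        rw [ih]
        simp [h, hp]
      | true =>
        by_cases hx : c = x
        · subst hx
          rw [if_neg (by simp [hp])]
          rw [ih]
          simp [h, List.find?_cons, hp, hnone]
        · rw [if_pos (by simp [hp, hx])]
          rw [ih]
          simp [h, List.find?_cons, hp, hnone, hx, Ne.symm hx]
    | some s =>
      have hs : sp s = true := List.find?_some h
      cases h2 : l.reverse.find? (fun c => sp c && s != c) with
      | some t =>
        cases hp : sp c with
        | false =>
          rw [if_neg (by simp [hp])]
          rw [ih]
          simp [h, h2, List.find?_cons]
        | true =>
          by_cases hx : c = x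
          · subst hx
            rw [if_neg (by simp [hp])]
            rw [ih]; simp [h, h2]
          · rw [if_pos (by simp [hp, hx])]
            rw [ih]; simp [h, h2]
      | none =>
        cases hp : sp c with
        | false =>
          rw [if_neg (by simp [hp])]
          rw [ih]
          simp [h, h2, List.find?_cons, hp]
        | true =>
          by_cases hx : c = x
          · subst hx
            rw [if_neg (by simp [hp])]
            rw [ih]
            by_cases hsc : s = c
            · subst hsc
              simp [h, h2, List.find?_cons, hp]
            · simp [h, h2, List.find?_cons, hp, hsc, Ne.symm hsc]
          · rw [if_pos (by simp [hp, hx])]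
            rw [ih]
            by_cases hsc : s = c
            · simp [h, h2, List.find?_cons, hp, hsc, hx]
            · simp [h, h2, List.find?_cons, hp, hsc, Ne.symm hsc, hx]

-- A's ordered output loop over the alphabet equals a filter, provided a = b only if a ∉ w
theorem strLemma (a b : Char) : ∀ (w acc : List Char), (a = b → a ∉ w) →
    w.foldl (fun s i =>
        let s := if a == i then s ++ [a] else s
        if b == i then s ++ [b] else s) acc
    = acc ++ w.filter (fun c => c == a || c == b) := by
  intro w
  induction w with
  | nil => intro acc _; simp
  | cons i w ih =>
    intro acc hab
    have hab' : a = b → a ∉ w := fun h => fun hw => hab h (List.mem_cons_of_mem _ hw)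
    simp only [List.foldl_cons]
    rw [ih _ hab']
    by_cases hai : a = i
    · have hbi : b ≠ i := by
        intro hb; exact hab (hai.trans hb.symm) (by simp [hai])
      subst hai
      simp [hbi, Ne.symm hbi]
    · by_cases hbi : b = i
      · subst hbi
        simp [hai, Ne.symm hai]
      · simp [hai, hbi, Ne.symm hai, Ne.symm hbi]

-- ===== VERDICT (by name: the statement is the Claim_ definition above) =====
theorem symbols_spec : Claim_equal_symbols := by
  intro m _
  unfold Spec_symbols symbols symbols_alt
  simp only []
  set al : List Char := "PbqsdKrk".toList with hal
  set sp : Char → Bool := fun c => al.contains c with hsp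
  have hA1 := lastFind sp m.toList '-'
  have hB := pairFind sp m.toList '-' '-'
  simp only [hsp] at hA1 hB
  rw [hA1, hB]
  cases h : m.toList.reverse.find? sp with
  | none =>
    have hb : m.toList.reverse.find? (fun i => sp i && (('-':Char) != i)) = none := by
      rw [List.find?_eq_none]
      intro u hu
      have := (List.find?_eq_none.mp h) u hu
      simp_all
    have hA2 := lastFind (fun i => sp i && (('-':Char) != i)) m.toList '-'
    simp only [hsp] at hb hA2
    rw [show ((none : Option Char).getD '-') = '-' from rfl]
    rw [hA2, hb]
    rw [show ((none : Option Char).getD '-') = '-' from rfl]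
    rw [strLemma '-' '-' al [] (by intro _h; exact (by decide : ('-':Char) ∉ "PbqsdKrk".toList))]
    simp
  | some s =>
    have hs : sp s = true := List.find?_some h
    have hsd : s ≠ '-' := by
      intro hh
      rw [hh, hsp, hal] at hs
      exact absurd hs (by decide)
    have hA2 := lastFind (fun i => sp i && (s != i)) m.toList '-'
    simp only [hsp] at hA2
    rw [show ((some s).getD '-') = s from rfl]
    conv_rhs => simp only []
    rw [hA2]
    rw [show (if (s == ('-':Char)) then ('-':Char) else '-') = ('-':Char) from by by_cases hc : s = '-' <;> simp [hc]]
    set b : Char := (m.toList.reverse.find? (fun c => al.contains c && s != c)).getD '-' with hbdef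
    have hab : s = b → s ∉ al := by
      intro hsb
      exfalso
      cases h2 : m.toList.reverse.find? (fun c => al.contains c && s != c) with
      | none =>
        rw [hbdef, h2] at hsb; simp at hsb; exact hsd hsb
      | some t =>
        have ht := List.find?_some h2
        rw [hbdef, h2] at hsb; simp at hsb
        rw [← hsb] at ht
        simp at ht
    rw [strLemma s b al [] hab]
    simp
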